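-- pv_equiv track=rewrite | github.com/danielcs88/Advent-of-Code | 2015/day03.py | part_two_simple
-- ===== SOURCE A (Python) =====
-- def part_two_simple(input_str: str) -> dict[tuple[int, int], int]:
--     houses = {}
--     x, y = 0, 0
--     houses[(x, y)] = 1
--
--     for sign in input_str:
--         match sign:
--             case "<":
--                 x -= 1
--             case ">":
--                 x += 1
--             case "^":
--                 y += 1
--             case "v":
--                 y -= 1
--         houses[(x, y)] = 1
--     return houses
-- ===== SOURCE B (Python) =====
-- def part_two_simple(input_str: str) -> dict[tuple[int, int], int]:
--     # Divide and conquer: the trail of a movement string is the trail of its first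
--     # half followed by the trail of its second half translated by the first half's
--     # endpoint (the walk is translation invariant).
--     DELTA = {"<": (-1, 0), ">": (1, 0), "^": (0, 1), "v": (0, -1)}
--
--     def walk(s):
--         n = len(s)
--         if n == 0:
--             return []
--         if n == 1:
--             return [DELTA.get(s, (0, 0))]
--         m = n // 2
--         left = walk(s[:m])
--         right = walk(s[m:])
--         ex, ey = left[-1]
--         return left + [(ex + qx, ey + qy) for qx, qy in right]
--
--     return dict.fromkeys([(0, 0)] + walk(input_str), 1)
-- ===== Notes on version B (the rewrite author's own statement) =====
-- stated objective: alternative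
-- what changed: B replaces A's single mutating pass (update x,y and insert into the dict per character) with a divide-and-conquer walk: it recursively computes the trail of each half of the string and translates the second half's trail by the first half's endpoint, then builds the dict in one shot with dict.fromkeys.
import Mathlib
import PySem

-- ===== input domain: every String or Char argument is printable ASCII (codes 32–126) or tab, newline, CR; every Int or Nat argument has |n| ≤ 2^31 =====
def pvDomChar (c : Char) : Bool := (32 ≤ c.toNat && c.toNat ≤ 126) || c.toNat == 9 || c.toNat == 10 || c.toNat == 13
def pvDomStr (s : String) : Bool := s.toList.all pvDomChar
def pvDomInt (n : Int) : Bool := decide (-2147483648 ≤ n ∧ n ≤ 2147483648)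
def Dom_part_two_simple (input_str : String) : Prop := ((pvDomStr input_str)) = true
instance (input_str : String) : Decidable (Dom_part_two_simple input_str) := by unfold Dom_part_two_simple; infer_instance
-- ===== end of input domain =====

-- B computes the trail by divide and conquer (trail of each half, second half translated by
-- the first half's endpoint) and dedups it in one shot, instead of A's in-loop dict insertion.

-- ===== PORT A =====
-- A's loop state: (houses, x, y); the match on sign becomes the if-chain in source order.
def part_two_simple (input_str : String) : List (Int × Int × Int) :=
  let houses : PySem.Dict (Int × Int) Int := (PySem.Dict.empty).insert (0, 0) 1
  let st := input_str.toList.foldl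
    (fun (s : PySem.Dict (Int × Int) Int × Int × Int) sign =>
      let xy : Int × Int :=
        if sign = '<' then (s.2.1 - 1, s.2.2)
        else if sign = '>' then (s.2.1 + 1, s.2.2)
        else if sign = '^' then (s.2.1, s.2.2 + 1)
        else if sign = 'v' then (s.2.1, s.2.2 - 1)
        else (s.2.1, s.2.2)
      (s.1.insert xy 1, xy)) (houses, 0, 0)
  st.1.items.map (fun p => (p.1.1, p.1.2, p.2))

-- ===== PORT B =====
-- the DELTA table with its .get default
def pvDelta (c : Char) : Int × Int :=
  if c = '<' then (-1, 0)
  else if c = '>' then (1, 0)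
  else if c = '^' then (0, 1)
  else if c = 'v' then (0, -1)
  else (0, 0)

-- Source B's walk: divide and conquer on the two halves of the string
def pvWalk (cs : List Char) : List (Int × Int) :=
  if cs.length = 0 then []
  else if cs.length = 1 then cs.map pvDelta
  else
    let m := cs.length / 2
    let l := pvWalk (cs.take m)
    let r := pvWalk (cs.drop m)
    let e := l.getLastD (0, 0)   -- left[-1]; left is nonempty here since m ≥ 1
    l ++ r.map (fun q => (e.1 + q.1, e.2 + q.2))
termination_by cs.length
decreasing_by
  · simp only [List.length_take]; omega
  · simp only [List.length_drop]; omega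

def part_two_simple_alt (input_str : String) : List (Int × Int × Int) :=
  let positions := (0, 0) :: pvWalk input_str.toList
  -- dict.fromkeys(positions, 1): first occurrences in order, each with value 1
  (PySem.List.dedup positions).map (fun p => (p.1, p.2, (1 : Int)))

-- ===== PRECONDITION & SPEC =====
def Spec_part_two_simple (input_str : String) (out : List (Int × Int × Int)) : Prop := out = part_two_simple_alt input_str
instance (input_str : String) (out : List (Int × Int × Int)) : Decidable (Spec_part_two_simple input_str out) := by unfold Spec_part_two_simple; infer_instance

-- ===== CLAIM (what is proved, stated in full; the proofs are below) =====
def Claim_equal_part_two_simple : Prop := ∀ (input_str : String), Dom_part_two_simple input_str → Spec_part_two_simple input_str (part_two_simple input_str)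

-- ===== LEMMAS AND PROOFS =====

-- the common normal form: the sequence of positions visited after the start point
def pvTrace (p : Int × Int) : List Char → List (Int × Int)
  | [] => []
  | c :: cs =>
      let q := (p.1 + (pvDelta c).1, p.2 + (pvDelta c).2)
      q :: pvTrace q cs

-- A's if-chain step is "add pvDelta c"
lemma pvStepA_eq (x y : Int) (c : Char) :
    (if c = '<' then (x - 1, y)
     else if c = '>' then (x + 1, y)
     else if c = '^' then (x, y + 1)
     else if c = 'v' then (x, y - 1)
     else (x, y)) = (x + (pvDelta c).1, y + (pvDelta c).2) := by
  unfold pvDelta; split_ifs <;> simp <;> ring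

-- A's fold: the dict component is an insert-fold over the trace
lemma pvTraceA (cs : List Char) : ∀ (d : PySem.Dict (Int × Int) Int) (x y : Int),
    (cs.foldl
      (fun (s : PySem.Dict (Int × Int) Int × Int × Int) sign =>
        let xy : Int × Int :=
          if sign = '<' then (s.2.1 - 1, s.2.2)
          else if sign = '>' then (s.2.1 + 1, s.2.2)
          else if sign = '^' then (s.2.1, s.2.2 + 1)
          else if sign = 'v' then (s.2.1, s.2.2 - 1)
          else (s.2.1, s.2.2)
        (s.1.insert xy 1, xy)) (d, x, y)).1
    = (pvTrace (x, y) cs).foldl (fun d q => d.insert q 1) d := by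
  induction cs with
  | nil => intro d x y; simp [pvTrace]
  | cons c cs ih =>
      intro d x y
      simp only [List.foldl_cons, pvTrace, pvStepA_eq x y c]
      exact ih _ _ _

-- the walk is translation invariant
lemma pvTrace_shift (cs : List Char) : ∀ (a b x y : Int),
    pvTrace (a + x, b + y) cs = (pvTrace (x, y) cs).map (fun q => (a + q.1, b + q.2)) := by
  induction cs with
  | nil => intro a b x y; simp [pvTrace]
  | cons c cs ih =>
      intro a b x y
      have h1 : a + x + (pvDelta c).1 = a + (x + (pvDelta c).1) := by ring
      have h2 : b + y + (pvDelta c).2 = b + (y + (pvDelta c).2) := by ring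
      simp only [pvTrace, List.map_cons, h1, h2]
      exact congrArg _ (ih a b _ _)

-- the trail of a concatenation: first trail, then the rest from its endpoint
lemma pvTrace_append (l : List Char) : ∀ (r : List Char) (p : Int × Int),
    pvTrace p (l ++ r) = pvTrace p l ++ pvTrace ((pvTrace p l).getLastD p) r := by
  induction l with
  | nil => intro r p; simp [pvTrace]
  | cons c l ih =>
      intro r p
      simp only [List.cons_append, pvTrace, List.getLastD_cons]
      rw [ih]

-- Source B's divide-and-conquer walk computes exactly the trace from the origin
lemma pvWalk_eq_aux (n : Nat) : ∀ (cs : List Char), cs.length ≤ n → pvWalk cs = pvTrace (0, 0) cs := by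
  induction n with
  | zero =>
      intro cs h
      have : cs = [] := List.eq_nil_of_length_eq_zero (by omega)
      subst this
      rw [pvWalk]; simp [pvTrace]
  | succ n ih =>
      intro cs h
      rw [pvWalk]
      split_ifs with h0 h1
      · have : cs = [] := List.eq_nil_of_length_eq_zero h0
        subst this; simp [pvTrace]
      · obtain ⟨c, hc⟩ := List.length_eq_one_iff.mp h1
        subst hc; simp [pvTrace]
      · dsimp only
        rw [ih _ (by simp only [List.length_take]; omega),
            ih _ (by simp only [List.length_drop]; omega)]
        have hsplit : cs = cs.take (cs.length / 2) ++ cs.drop (cs.length / 2) := (List.take_append_drop _ _).symm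
        conv_rhs => rw [hsplit]
        rw [pvTrace_append]
        congr 1
        set e := (pvTrace (0, 0) (cs.take (cs.length / 2))).getLastD (0, 0) with he
        have : e = (e.1 + 0, e.2 + 0) := by simp
        rw [this, pvTrace_shift]
        simp

lemma pvWalk_eq (cs : List Char) : pvWalk cs = pvTrace (0, 0) cs :=
  pvWalk_eq_aux cs.length cs le_rfl

-- every value in the dict built by the insert-fold is 1
lemma pvAllOne (ps : List (Int × Int)) : ∀ (d : PySem.Dict (Int × Int) Int),
    (∀ k, d.getD k 1 = 1) →
    ∀ k, (ps.foldl (fun d q => d.insert q 1) d).getD k 1 = 1 := by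
  induction ps with
  | nil => intro d h k; exact h k
  | cons p ps ih =>
      intro d h k
      refine ih _ (fun k => ?_) k
      rw [PySem.Dict.getD_insert]
      split <;> [rfl; exact h k]

-- the insert-fold from empty, as items: exactly dict.fromkeys(ps, 1)
lemma pvItemsFold (ps : List (Int × Int)) :
    (ps.foldl (fun d q => d.insert q 1) (PySem.Dict.empty)).items
    = (PySem.List.dedup ps).map (fun k => (k, (1 : Int))) := by
  have hnd : (ps.foldl (fun d q => d.insert q 1) (PySem.Dict.empty : PySem.Dict (Int × Int) Int)).keys.Nodup :=
    PySem.Dict.nodup_keys_foldl_insert ps (fun _ _ => (1 : Int)) _ PySem.Dict.nodup_keys_empty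
  have hk : (ps.foldl (fun d q => d.insert q 1) (PySem.Dict.empty : PySem.Dict (Int × Int) Int)).keys
      = PySem.Set.ofList ps := by
    simpa using PySem.Dict.keys_foldl_insert ps (fun _ _ => (1 : Int)) PySem.Dict.empty
  rw [PySem.Dict.items_eq_map_keys _ hnd 1, hk]
  have hone := pvAllOne ps PySem.Dict.empty (fun k => by simp [pysem])
  refine List.map_congr_left (fun k _ => ?_)
  simp [hone k]

-- ===== VERDICT (by name: the statement is the Claim_ definition above) =====
theorem part_two_simple_spec : Claim_equal_part_two_simple := by
  intro input_str _
  unfold Spec_part_two_simple part_two_simple part_two_simple_alt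
  dsimp only
  rw [pvTraceA, pvWalk_eq]
  have : ((0, 0) :: pvTrace (0, 0) input_str.toList).foldl
      (fun (d : PySem.Dict (Int × Int) Int) q => d.insert q 1) PySem.Dict.empty
      = (pvTrace (0, 0) input_str.toList).foldl (fun d q => d.insert q 1)
          ((PySem.Dict.empty).insert (0, 0) 1) := by
    simp
  rw [← this, pvItemsFold]
  simp [List.map_map, Function.comp]
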